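-- pv_equiv track=rewrite | github.com/jasonmayday/LeetCode | leetcode_cup/1_easy/LCS_02_完成一半题目.py | halfQuestions
-- ===== SOURCE A (Python) =====
-- from typing import List
-- from collections import Counter
--
-- def halfQuestions(questions: List[int]) -> int:
--     n = len(questions) // 2         # n = 扣友人数
--     num_freq = Counter(questions)   # 统计每个数字出现的频率 Counter = ({2: 2, 1: 1, 6: 1})
--     sorted_freq = sorted(num_freq.items(), key = lambda x: -x[1])    # 按照频率排序 [(2, 2), (1, 1), (6, 1)]
--
--     category = 0    # 知识点类型
--     count = 0
--     for question, freq in sorted_freq: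
--         if count >= n:
--             return category
--         else:
--             count += freq
--             category += 1
--     return category
-- ===== SOURCE B (Python) =====
-- from typing import List
-- from collections import Counter
--
-- def halfQuestions(questions: List[int]) -> int:
--     if not questions:
--         return 0
--     n = len(questions) // 2
--     freq_of = Counter(questions)            # category -> how many questions it has
--     buckets = Counter(freq_of.values())     # frequency -> how many categories have it
--     count = 0
--     category = 0
--     for f in range(max(buckets), 0, -1):    # walk frequencies from highest to lowest
--         for _ in range(buckets[f]):
--             if count >= n:
--                 return category
--             count += f
--             category += 1
--     return category
-- ===== Notes on version B (the rewrite author's own statement) =====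
-- stated objective: alternative
-- what changed: Replaces A's sort of (category, frequency) pairs by -frequency with a frequency->bucket Counter walked from the highest frequency down to 1, expanding each bucket in the greedy count/category walk, with an explicit empty-input guard.
import Mathlib
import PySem

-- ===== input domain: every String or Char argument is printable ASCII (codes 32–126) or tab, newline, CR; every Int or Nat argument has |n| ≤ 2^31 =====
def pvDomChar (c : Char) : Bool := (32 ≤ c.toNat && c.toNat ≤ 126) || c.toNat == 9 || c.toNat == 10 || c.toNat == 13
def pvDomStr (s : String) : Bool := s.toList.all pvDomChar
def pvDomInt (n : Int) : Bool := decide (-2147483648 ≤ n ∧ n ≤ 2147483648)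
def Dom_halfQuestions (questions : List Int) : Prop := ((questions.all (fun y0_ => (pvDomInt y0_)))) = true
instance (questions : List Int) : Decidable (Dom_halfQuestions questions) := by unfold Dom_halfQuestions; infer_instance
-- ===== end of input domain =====

-- B replaces A's sort of the categories by frequency with a bucket table indexed by
-- frequency, walked from the highest frequency down (objective: alternative, no sort).

-- ===== PORT A =====
-- A's loop: 'if count >= n: return category; else count += freq; category += 1', final 'return category'
def aLoop (n : Int) : List (Int × Int) → Int → Int → Int
  | [], category, _ => category
  | (_, freq) :: rest, category, count =>
    if count ≥ n then category else aLoop n rest (category + 1) (count + freq)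

def halfQuestions (questions : List Int) : Int :=
  let n : Int := PySem.Int.floordiv (PySem.List.len questions) 2
  let numFreq := PySem.Dict.counter questions
  let sortedFreq := PySem.List.sorted numFreq.items (fun x => -x.2)
  aLoop n sortedFreq 0 0

-- ===== PORT B =====
-- inner 'for _ in range(buckets[f]): if count >= n: return category; count += f; category += 1';
-- an early return is signalled as 'some category'
def bInner (n f : Int) : Nat → Int × Int → Option Int × (Int × Int)
  | 0, s => (none, s)
  | k + 1, (category, count) =>
    if count ≥ n then (some category, (category, count))
    else bInner n f k (category + 1, count + f)

def bOuter (n : Int) (buckets : PySem.Dict Int Int) : List Int → Int × Int → Int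
  | [], (category, _) => category
  | f :: rest, s =>
    match bInner n f ((buckets.getD f 0).toNat) s with
    | (some r, _) => r
    | (none, s') => bOuter n buckets rest s'

def halfQuestions_alt (questions : List Int) : Int :=
  if questions = [] then 0
  else
    let n : Int := PySem.Int.floordiv (PySem.List.len questions) 2
    let freqOf := PySem.Dict.counter questions
    let buckets := PySem.Dict.counter freqOf.values
    -- max(buckets): buckets is nonempty on this branch, so the .getD 0 default is never used
    let maxf : Int := (PySem.List.max? buckets.keys (fun x => x)).getD 0
    bOuter n buckets (PySem.List.pyRange maxf 0 (-1)) (0, 0)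

-- ===== PRECONDITION & SPEC =====
def Spec_halfQuestions (questions : List Int) (out : Int) : Prop := out = halfQuestions_alt questions
instance (questions : List Int) (out : Int) : Decidable (Spec_halfQuestions questions out) := by unfold Spec_halfQuestions; infer_instance

-- ===== CLAIM (what is proved, stated in full; the proofs are below) =====
def Claim_equal_halfQuestions : Prop := ∀ (questions : List Int), Dom_halfQuestions questions → Spec_halfQuestions questions (halfQuestions questions)

-- ===== LEMMAS AND PROOFS =====

-- the common core: the greedy walk over a plain list of frequencies
def pvCore (n : Int) : List Int → Int → Int → Int
  | [], category, _ => category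
  | f :: rest, category, count =>
    if count ≥ n then category else pvCore n rest (category + 1) (count + f)

theorem aLoop_eq_core (n : Int) (L : List (Int × Int)) : ∀ (cat cnt : Int),
    aLoop n L cat cnt = pvCore n (L.map Prod.snd) cat cnt := by
  induction L with
  | nil => intro cat cnt; rfl
  | cons p rest ih =>
    intro cat cnt
    obtain ⟨q, f⟩ := p
    simp only [aLoop, List.map_cons, pvCore]
    split_ifs with h
    · rfl
    · exact ih _ _

theorem bInner_eq_core (n f : Int) : ∀ (k : Nat) (cat cnt : Int) (L : List Int),
    (match bInner n f k (cat, cnt) with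
     | (some r, _) => r
     | (none, s') => pvCore n L s'.1 s'.2)
      = pvCore n (List.replicate k f ++ L) cat cnt := by
  intro k
  induction k with
  | zero => intro cat cnt L; rfl
  | succ k ih =>
    intro cat cnt L
    simp only [bInner, List.replicate_succ, List.cons_append, pvCore]
    split_ifs with h
    · rfl
    · exact ih _ _ _

theorem bOuter_eq_core (n : Int) (buckets : PySem.Dict Int Int) :
    ∀ (fs : List Int) (cat cnt : Int),
    bOuter n buckets fs (cat, cnt)
      = pvCore n (fs.flatMap (fun f => List.replicate ((buckets.getD f 0).toNat) f)) cat cnt := by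
  intro fs
  induction fs with
  | nil => intro cat cnt; simp only [List.flatMap_nil]; rfl
  | cons f rest ih =>
    intro cat cnt
    simp only [bOuter, List.flatMap_cons]
    rw [← bInner_eq_core n f ((buckets.getD f 0).toNat) cat cnt]
    cases hb : bInner n f ((buckets.getD f 0).toNat) (cat, cnt) with
    | mk o s' =>
      cases o with
      | some r => simp
      | none => simpa using ih s'.1 s'.2

-- count of each element in the bucket expansion of [k, k-1, …, 1]
theorem count_flat (c : Int → Nat) : ∀ (k : Nat) (x : Int),
    (((PySem.List.pyRange (k : Int) 0 (-1)).flatMap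
        (fun f => List.replicate (c f) f)).count x)
      = if 1 ≤ x ∧ x ≤ (k : Int) then c x else 0 := by
  intro k
  induction k with
  | zero =>
    intro x
    rw [PySem.List.pyRange_neg_one_eq_nil (by norm_num)]
    simp; omega
  | succ k ih =>
    intro x
    have hcons : PySem.List.pyRange ((k + 1 : Nat) : Int) 0 (-1)
        = ((k + 1 : Nat) : Int) :: PySem.List.pyRange ((k : Nat) : Int) 0 (-1) := by
      rw [PySem.List.pyRange_neg_one_cons (by push_cast; omega)]
      have hsub : ((k + 1 : Nat) : Int) - 1 = ((k : Nat) : Int) := by push_cast; omega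
      rw [hsub]
    rw [hcons]
    simp only [List.flatMap_cons, List.count_append, List.count_replicate, beq_iff_eq, ih]
    by_cases hx : ((k + 1 : Nat) : Int) = x
    · rw [if_pos hx, ← hx]
      have h1 : ¬ (1 ≤ ((k+1:Nat):Int) ∧ ((k+1:Nat):Int) ≤ ((k:Nat):Int)) := by push_cast; omega
      have h2 : (1 ≤ ((k+1:Nat):Int) ∧ ((k+1:Nat):Int) ≤ ((k+1:Nat):Int)) := by push_cast; omega
      rw [if_neg h1, if_pos h2]
      omega
    · rw [if_neg hx]
      have hx' : x ≠ ((k+1:Nat):Int) := fun h => hx h.symm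
      have hiff : (1 ≤ x ∧ x ≤ ((k:Nat):Int)) ↔ (1 ≤ x ∧ x ≤ ((k+1:Nat):Int)) := by
        push_cast at hx' ⊢; omega
      split_ifs with ha hb hb
      · omega
      · exact absurd (hiff.mp ha) hb
      · exact absurd (hiff.mpr hb) ha
      · omega

-- the bucket expansion is nonincreasing
theorem pairwise_flat (c : Int → Nat) (k : Nat) :
    List.Pairwise (fun a b => b ≤ a)
      ((PySem.List.pyRange (k : Int) 0 (-1)).flatMap
        (fun f => List.replicate (c f) f)) := by
  rw [List.pairwise_flatMap]
  constructor
  · intro a _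
    rw [List.pairwise_replicate]
    right; exact le_refl a
  · have hdec : List.Pairwise (fun a b => b < a) (PySem.List.pyRange (k : Int) 0 (-1)) := by
      rw [PySem.List.pyRange_neg_one_eq_reverse, List.pairwise_reverse]
      exact PySem.List.pairwise_lt_pyRange_one _ _
    refine hdec.imp ?_
    intro a b hab x hx y hy
    rw [List.eq_of_mem_replicate hx, List.eq_of_mem_replicate hy]
    exact le_of_lt hab

-- the values of Counter(xs) are the positive counts of the distinct elements
theorem values_counter (xs : List Int) :
    (PySem.Dict.counter xs).values
      = (PySem.Set.ofList xs).map (fun kk => ((xs.count kk : Int))) := by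
  show ((PySem.Dict.counter xs).items).map Prod.snd = _
  rw [PySem.Dict.items_counter, List.map_map]
  rfl

theorem values_counter_pos (xs : List Int) (x : Int)
    (hx : x ∈ (PySem.Dict.counter xs).values) : 1 ≤ x := by
  rw [values_counter] at hx
  obtain ⟨kk, hk, rfl⟩ := List.mem_map.mp hx
  have : kk ∈ xs := (PySem.Set.mem_ofList _ _).mp hk
  have := List.count_pos_iff.mpr this
  omega

-- ===== main equality =====
theorem halfQuestions_eq (questions : List Int) :
    halfQuestions questions = halfQuestions_alt questions := by
  by_cases hq : questions = []
  · subst hq; decide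
  · obtain ⟨q, qs', rfl⟩ := List.exists_cons_of_ne_nil hq
    unfold halfQuestions halfQuestions_alt
    rw [if_neg hq]
    -- reduce both loops to the common core walk (simp also zeta-reduces the lets)
    simp only [aLoop_eq_core, bOuter_eq_core]
    set n : Int := PySem.Int.floordiv (PySem.List.len (q :: qs')) 2 with hn
    set numFreq := PySem.Dict.counter (q :: qs') with hnf
    set values := numFreq.values with hv
    set buckets := PySem.Dict.counter values with hbk
    have hvne : values ≠ [] := by
      rw [hv, hnf, values_counter]
      intro hcon
      rw [List.map_eq_nil_iff] at hcon
      have : q ∈ PySem.Set.ofList (q :: qs') := (PySem.Set.mem_ofList _ _).mpr (by simp)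
      rw [hcon] at this
      exact absurd this (List.not_mem_nil)
    -- max over the bucket keys exists
    have hkeys : buckets.keys = PySem.Set.ofList values := PySem.Dict.keys_counter values
    have hkne : buckets.keys ≠ [] := by
      rw [hkeys]
      intro hcon
      obtain ⟨v0, vs', hv0⟩ := List.exists_cons_of_ne_nil hvne
      have : v0 ∈ PySem.Set.ofList values := (PySem.Set.mem_ofList _ _).mpr (by rw [hv0]; simp)
      rw [hcon] at this
      exact absurd this (List.not_mem_nil)
    obtain ⟨maxf, hmax⟩ : ∃ m, PySem.List.max? buckets.keys (fun x => x) = some m := by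
      cases hm : PySem.List.max? buckets.keys (fun x => x) with
      | none => exact absurd ((PySem.List.max?_eq_none_iff _ _).mp hm) hkne
      | some m => exact ⟨m, rfl⟩
    simp only [hmax, Option.getD_some]
    -- maxf is at least 1 and bounds every value
    have hmem : maxf ∈ values := by
      have := PySem.List.max?_mem hmax
      rw [hkeys] at this
      exact (PySem.Set.mem_ofList _ _).mp this
    have hmaxf1 : 1 ≤ maxf := values_counter_pos _ _ (hv ▸ hmem)
    have hbound : ∀ x ∈ values, x ≤ maxf := by
      intro x hx
      have hxk : x ∈ buckets.keys := by
        rw [hkeys]; exact (PySem.Set.mem_ofList _ _).mpr hx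
      exact PySem.List.max?_isMax hmax x hxk
    -- the two frequency lists are equal
    have hc : ∀ f : Int, (buckets.getD f 0).toNat = values.count f := by
      intro f
      rw [hbk, PySem.Dict.getD_counter]
      exact Int.toNat_natCast _
    have hkcast : ((maxf.toNat : Nat) : Int) = maxf := Int.toNat_of_nonneg (by omega)
    set flat := (PySem.List.pyRange maxf 0 (-1)).flatMap
        (fun f => List.replicate ((buckets.getD f 0).toNat) f) with hflat
    have hflat' : flat = (PySem.List.pyRange ((maxf.toNat : Nat) : Int) 0 (-1)).flatMap
        (fun f => List.replicate ((buckets.getD f 0).toNat) f) := by rw [hkcast]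
    have hperm : flat.Perm values := by
      rw [List.perm_iff_count]
      intro x
      rw [hflat', count_flat]
      rw [hkcast, hc]
      split_ifs with h
      · rfl
      · by_contra hcon
        have hxm : x ∈ values := List.count_pos_iff.mp (by omega)
        have h1 := values_counter_pos (q :: qs') x (hv ▸ hxm)
        have h2 := hbound x hxm
        exact h (by omega)
    have hsortedA : List.Pairwise (fun a b => b ≤ a)
        ((PySem.List.sorted numFreq.items (fun x => -x.2)).map Prod.snd) := by
      rw [List.pairwise_map]
      refine (PySem.List.sorted_pairwise numFreq.items (fun x => -x.2)).imp ?_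
      intro a b h
      omega
    have hsortedB : List.Pairwise (fun a b => b ≤ a) flat := by
      rw [hflat']
      exact pairwise_flat _ _
    have hpermA : ((PySem.List.sorted numFreq.items (fun x => -x.2)).map Prod.snd).Perm values := by
      have h := PySem.List.sorted_perm numFreq.items (fun x => -x.2) false
      exact h.map Prod.snd
    have heq : (PySem.List.sorted numFreq.items (fun x => -x.2)).map Prod.snd = flat := by
      refine List.Perm.eq_of_pairwise ?_ hsortedA hsortedB (hpermA.trans hperm.symm)
      intro a b _ _ h1 h2
      omega
    rw [heq]

-- ===== VERDICT (by name: the statement is the Claim_ definition above) =====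
theorem halfQuestions_spec : Claim_equal_halfQuestions := by
  intro questions _
  unfold Spec_halfQuestions
  exact halfQuestions_eq questions
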